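-- pv_equiv track=rewrite | github.com/aviswerdlow/k4 | 04_EXPERIMENTS/shadow_delta/shadow_zones.py | _consolidate_mask
-- ===== SOURCE A (Python) =====
-- from typing import List, Tuple, Dict
--
-- def _consolidate_mask(mask: List[Tuple[int, int, int]]) -> List[Tuple[int, int, int]]:
--     """Consolidate adjacent segments with same state."""
--     if not mask:
--         return mask
--
--     consolidated = []
--     current_start, current_end, current_state = mask[0]
--
--     for start, end, state in mask[1:]:
--         if state == current_state and start == current_end + 1:
--             current_end = end
--         else:
--             consolidated.append((current_start, current_end, current_state))
--             current_start, current_end, current_state = start, end, state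
--
--     consolidated.append((current_start, current_end, current_state))
--     return consolidated
-- ===== SOURCE B (Python) =====
-- from typing import List, Tuple
--
-- def _consolidate_mask(mask: List[Tuple[int, int, int]]) -> List[Tuple[int, int, int]]:
--     """Recursively emit one segment per maximal run of chained same-state segments."""
--     def run_end(end: int, state: int, rest: List[Tuple[int, int, int]]) -> Tuple[int, int]:
--         # (final end, number of segments of `rest` that chain onto a run ending at (end, state))
--         k = 0
--         while k < len(rest) and rest[k][2] == state and rest[k][0] == end + 1:
--             end = rest[k][1]
--             k += 1
--         return end, k
--
--     if not mask:
--         return mask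
--     (start, end, state), rest = mask[0], mask[1:]
--     end, k = run_end(end, state, rest)
--     return [(start, end, state)] + _consolidate_mask(rest[k:])
-- ===== Notes on version B (the rewrite author's own statement) =====
-- stated objective: alternative
-- what changed: B replaces A's accumulator loop with separate current_* scalars by a two-level run-grouping recursion: an inner scan (run_end) finds the extent of the maximal chained same-state run starting at the first segment, one merged segment is emitted, and the function recurses on the remaining suffix, building the output front-to-back by list concatenation.
import Mathlib
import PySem

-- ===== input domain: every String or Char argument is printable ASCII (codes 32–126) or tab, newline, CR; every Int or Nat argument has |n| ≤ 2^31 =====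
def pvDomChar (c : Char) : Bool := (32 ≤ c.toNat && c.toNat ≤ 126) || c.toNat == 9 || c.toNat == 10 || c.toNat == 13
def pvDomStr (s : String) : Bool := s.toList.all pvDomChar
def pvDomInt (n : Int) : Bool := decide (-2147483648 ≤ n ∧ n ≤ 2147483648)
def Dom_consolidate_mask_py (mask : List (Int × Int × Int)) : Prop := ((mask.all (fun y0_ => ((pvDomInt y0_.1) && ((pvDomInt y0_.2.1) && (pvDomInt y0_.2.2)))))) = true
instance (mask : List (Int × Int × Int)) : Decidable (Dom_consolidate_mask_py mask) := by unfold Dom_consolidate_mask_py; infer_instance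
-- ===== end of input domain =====

-- B groups each maximal chain of adjacent same-state segments by recursion with an inner run-extent
-- scan, instead of A's accumulator loop with current_* scalars; objective: alternative decomposition.

-- ===== PORT A =====
-- the 'for start, end, state in mask[1:]' loop with state (consolidated, current_start, current_end, current_state)
def consolidateLoopA : List (Int × Int × Int) → List (Int × Int × Int) → Int → Int → Int → List (Int × Int × Int)
  | [], consolidated, cs, ce, cst => consolidated ++ [(cs, ce, cst)]
  | (s, e, st) :: rest, consolidated, cs, ce, cst =>
    if st = cst ∧ s = ce + 1 then
      consolidateLoopA rest consolidated cs e cst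
    else
      consolidateLoopA rest (consolidated ++ [(cs, ce, cst)]) s e st

def consolidate_mask_py (mask : List (Int × Int × Int)) : List (Int × Int × Int) :=
  match mask with
  | [] => []
  | (cs, ce, cst) :: rest => consolidateLoopA rest [] cs ce cst

-- ===== PORT B =====
-- run_end's while loop over `rest` (its 'k' index walk is the structural recursion on `rest`):
-- returns the run's final end and the count k of chained segments consumed
def runEnd : Int → Int → List (Int × Int × Int) → Int × Nat
  | e, _, [] => (e, 0)
  | e, st, (s, e2, st2) :: tl =>
    if st2 = st ∧ s = e + 1 then
      let r := runEnd e2 st tl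
      (r.1, r.2 + 1)
    else (e, 0)

def consolidate_mask_py_alt (mask : List (Int × Int × Int)) : List (Int × Int × Int) :=
  match mask with
  | [] => []
  | (start, e, state) :: rest =>
    let r := runEnd e state rest
    [(start, r.1, state)] ++ consolidate_mask_py_alt (rest.drop r.2)
termination_by mask.length
decreasing_by
  simp only [List.length_cons]
  exact Nat.lt_succ_of_le (le_trans (List.length_drop ▸ Nat.sub_le _ _) (le_refl _))

-- ===== PRECONDITION & SPEC =====
def Spec_consolidate_mask_py (mask : List (Int × Int × Int)) (out : List (Int × Int × Int)) : Prop := out = consolidate_mask_py_alt mask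
instance (mask : List (Int × Int × Int)) (out : List (Int × Int × Int)) : Decidable (Spec_consolidate_mask_py mask out) := by unfold Spec_consolidate_mask_py; infer_instance

-- ===== CLAIM (what is proved, stated in full; the proofs are below) =====
def Claim_equal_consolidate_mask_py : Prop := ∀ (mask : List (Int × Int × Int)), Dom_consolidate_mask_py mask → Spec_consolidate_mask_py mask (consolidate_mask_py mask)

-- ===== LEMMAS AND PROOFS =====
-- invariant: A's loop on `rest` with pending segment (cs, ce, cst) and emitted prefix `acc`
-- produces acc ++ B's run-grouping of (cs, ce, cst) :: rest
theorem consolidateLoop_eq_alt (rest : List (Int × Int × Int)) :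
    ∀ (acc : List (Int × Int × Int)) (cs ce cst : Int),
      consolidateLoopA rest acc cs ce cst
        = acc ++ consolidate_mask_py_alt ((cs, ce, cst) :: rest) := by
  induction rest with
  | nil =>
    intro acc cs ce cst
    simp [consolidateLoopA, consolidate_mask_py_alt, runEnd]
  | cons hd tl ih =>
    intro acc cs ce cst
    obtain ⟨s, e, st⟩ := hd
    by_cases h : st = cst ∧ s = ce + 1
    · rw [consolidate_mask_py_alt]
      simp only [consolidateLoopA, runEnd, if_pos h]
      rw [ih acc cs e cst, consolidate_mask_py_alt]
      simp
    · rw [consolidate_mask_py_alt]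
      simp only [consolidateLoopA, runEnd, if_neg h]
      rw [ih (acc ++ [(cs, ce, cst)]) s e st]
      simp

-- ===== VERDICT (by name: the statement is the Claim_ definition above) =====
theorem consolidate_mask_py_spec : Claim_equal_consolidate_mask_py := by
  intro mask _
  unfold Spec_consolidate_mask_py consolidate_mask_py
  match mask with
  | [] => rw [consolidate_mask_py_alt]
  | (cs, ce, cst) :: rest => simpa using consolidateLoop_eq_alt rest [] cs ce cst
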